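-- pv_equiv track=rewrite | github.com/buhtig47/jobmitra | backend/main.py | user_qualifies
-- ===== SOURCE A (Python) =====
-- EDUCATION_LEVELS = {
--     "8th": 1, "10th": 2, "12th": 3,
--     "diploma": 3, "graduate": 4, "postgraduate": 5
-- }
--
-- def user_qualifies(user_education: str, job_qualifications: list) -> bool:
--     if not job_qualifications or "all" in job_qualifications:
--         return True
--     user_level = EDUCATION_LEVELS.get(user_education, 4)
--     for qual in job_qualifications:
--         required_level = EDUCATION_LEVELS.get(qual, 4)
--         if user_level >= required_level:
--             return True
--     return False
-- ===== SOURCE B (Python) =====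
-- EDUCATION_LEVELS = {
--     "8th": 1, "10th": 2, "12th": 3,
--     "diploma": 3, "graduate": 4, "postgraduate": 5
-- }
--
-- def user_qualifies(user_education: str, job_qualifications: list) -> bool:
--     if not job_qualifications or "all" in job_qualifications:
--         return True
--     user_level = EDUCATION_LEVELS.get(user_education, 4)
--     # invert the table: the set of qualification names the user's level satisfies
--     acceptable = {name for name, lvl in EDUCATION_LEVELS.items() if lvl <= user_level}
--     if not acceptable.isdisjoint(job_qualifications):
--         return True
--     # unknown qualification names default to the required level 4
--     return user_level >= 4 and not set(job_qualifications) <= EDUCATION_LEVELS.keys()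
-- ===== Notes on version B (the rewrite author's own statement) =====
-- stated objective: alternative
-- what changed: Instead of mapping each job qualification to a level and scanning with early return, B inverts the table: it builds the set of qualification names the user's level satisfies and answers by set disjointness against the job's list, plus one subset test handling unknown names (which default to level 4).
import Mathlib
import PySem

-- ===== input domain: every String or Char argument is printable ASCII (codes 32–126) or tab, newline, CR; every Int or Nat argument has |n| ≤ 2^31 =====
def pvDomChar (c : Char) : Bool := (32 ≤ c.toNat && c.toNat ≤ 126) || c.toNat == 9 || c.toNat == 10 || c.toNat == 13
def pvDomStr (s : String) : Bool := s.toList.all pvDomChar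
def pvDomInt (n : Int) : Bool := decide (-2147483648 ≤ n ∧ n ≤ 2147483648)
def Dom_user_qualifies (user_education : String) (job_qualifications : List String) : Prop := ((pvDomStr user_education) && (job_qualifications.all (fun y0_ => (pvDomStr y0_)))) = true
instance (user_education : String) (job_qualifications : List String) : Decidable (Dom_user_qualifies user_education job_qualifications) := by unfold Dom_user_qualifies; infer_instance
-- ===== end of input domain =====

-- B inverts the lookup: instead of mapping each qualification to a level and scanning with early
-- return, it builds from the table the SET of qualification names the user's level satisfies and
-- answers by set disjointness plus one subset test for unknown names (objective: alternative).


-- module-level constant EDUCATION_LEVELS, shared by both versions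
def eduLevels : PySem.Dict String Int :=
  PySem.Dict.ofList [("8th", 1), ("10th", 2), ("12th", 3), ("diploma", 3), ("graduate", 4), ("postgraduate", 5)]

-- ===== PORT A =====
-- the for-loop with early return
def uqLoop (userLevel : Int) : List String → Bool
  | [] => false
  | qual :: rest =>
    let requiredLevel := PySem.Dict.getD eduLevels qual 4
    if userLevel ≥ requiredLevel then true else uqLoop userLevel rest

def user_qualifies (user_education : String) (job_qualifications : List String) : Bool :=
  if job_qualifications.isEmpty || job_qualifications.contains "all" then true
  else uqLoop (PySem.Dict.getD eduLevels user_education 4) job_qualifications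

-- ===== PORT B =====
def user_qualifies_alt (user_education : String) (job_qualifications : List String) : Bool :=
  if job_qualifications.isEmpty || job_qualifications.contains "all" then true
  else
    let userLevel := PySem.Dict.getD eduLevels user_education 4
    -- acceptable = {name for name, lvl in EDUCATION_LEVELS.items() if lvl <= user_level}
    let acceptable : PySem.Set String :=
      PySem.Set.ofList ((eduLevels.items.filter (fun p => decide (p.2 ≤ userLevel))).map Prod.fst)
    if !(PySem.Set.isdisjoint acceptable job_qualifications) then true
    else decide (userLevel ≥ 4) && !(PySem.Set.issubset (PySem.Set.ofList job_qualifications) eduLevels.keys)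

-- ===== PRECONDITION & SPEC =====
def Spec_user_qualifies (user_education : String) (job_qualifications : List String) (out : Bool) : Prop := out = user_qualifies_alt user_education job_qualifications
instance (user_education : String) (job_qualifications : List String) (out : Bool) : Decidable (Spec_user_qualifies user_education job_qualifications out) := by unfold Spec_user_qualifies; infer_instance

-- ===== CLAIM (what is proved, stated in full; the proofs are below) =====
def Claim_equal_user_qualifies : Prop := ∀ (user_education : String) (job_qualifications : List String), Dom_user_qualifies user_education job_qualifications → Spec_user_qualifies user_education job_qualifications (user_qualifies user_education job_qualifications)

-- ===== LEMMAS AND PROOFS =====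

-- the literal dict behind the Dict.ofList constant (lets get?_mk_cons fire)
theorem eduLevels_eq : eduLevels = PySem.Dict.mk [("8th", 1), ("10th", 2), ("12th", 3), ("diploma", 3), ("graduate", 4), ("postgraduate", 5)] := by decide

theorem get?_mk_nil (q : String) : (PySem.Dict.mk ([] : List (String × Int))).get? q = none := rfl

-- per-element bridge: "user level meets q's required level" ↔ "q is an acceptable known name,
-- or q is unknown and the user's level meets the default 4"
theorem elem_bridge (u : Int) (q : String) :
    (u ≥ PySem.Dict.getD eduLevels q 4) ↔
      (q ∈ ((eduLevels.items.filter (fun p => decide (p.2 ≤ u))).map Prod.fst)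
        ∨ (u ≥ 4 ∧ q ∉ eduLevels.keys)) := by
  rw [eduLevels_eq]
  by_cases h1 : q = "8th"
  · subst h1; simp [PySem.Dict.getD, PySem.Dict.get?_mk_cons, PySem.Dict.keys]
  by_cases h2 : q = "10th"
  · subst h2; simp [PySem.Dict.getD, PySem.Dict.get?_mk_cons, PySem.Dict.keys]
  by_cases h3 : q = "12th"
  · subst h3; simp [PySem.Dict.getD, PySem.Dict.get?_mk_cons, PySem.Dict.keys]
  by_cases h4 : q = "diploma"
  · subst h4; simp [PySem.Dict.getD, PySem.Dict.get?_mk_cons, PySem.Dict.keys]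
  by_cases h5 : q = "graduate"
  · subst h5; simp [PySem.Dict.getD, PySem.Dict.get?_mk_cons, PySem.Dict.keys]
  by_cases h6 : q = "postgraduate"
  · subst h6; simp [PySem.Dict.getD, PySem.Dict.get?_mk_cons, PySem.Dict.keys]
  · simp [PySem.Dict.getD, PySem.Dict.get?_mk_cons, get?_mk_nil, PySem.Dict.keys,
      List.mem_map, List.mem_filter, h1, h2, h3, h4, h5, h6, Ne.symm h1, Ne.symm h2,
      Ne.symm h3, Ne.symm h4, Ne.symm h5, Ne.symm h6]

-- A's early-return loop is List.any of the per-element test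
theorem uqLoop_any (u : Int) (l : List String) :
    uqLoop u l = l.any (fun q => decide (u ≥ PySem.Dict.getD eduLevels q 4)) := by
  induction l with
  | nil => rfl
  | cons q rest ih =>
    by_cases h : u ≥ PySem.Dict.getD eduLevels q 4 <;> simp [uqLoop, h, ih]

-- ===== VERDICT (by name: the statement is the Claim_ definition above) =====
theorem user_qualifies_spec : Claim_equal_user_qualifies := by
  intro ue jq _
  unfold Spec_user_qualifies user_qualifies user_qualifies_alt
  by_cases hg : (jq.isEmpty || jq.contains "all") = true
  · rw [if_pos hg, if_pos hg]
  · simp only [hg, Bool.false_eq_true, if_false]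
    rw [uqLoop_any]
    set u := PySem.Dict.getD eduLevels ue 4 with hu
    rw [Bool.eq_iff_iff]
    simp only [List.any_eq_true, decide_eq_true_eq, Bool.if_true_left, Bool.or_eq_true,
      Bool.and_eq_true, Bool.not_eq_eq_eq_not]
    constructor
    · rintro ⟨q, hq, h⟩
      rcases (elem_bridge u q).1 h with hmem | ⟨h4, hk⟩
      · left
        rw [Bool.not_true, Bool.eq_false_iff, Ne, PySem.Set.isdisjoint_iff]
        push Not
        exact ⟨q, (PySem.Set.mem_ofList _ _).2 hmem, hq⟩
      · right
        refine ⟨by simpa using h4, ?_⟩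
        rw [Bool.not_true, Bool.eq_false_iff, Ne, PySem.Set.issubset_iff]
        push Not
        exact ⟨q, (PySem.Set.mem_ofList _ _).2 hq, hk⟩
    · rintro (hdis | ⟨h4, hsub⟩)
      · rw [Bool.not_true, Bool.eq_false_iff, Ne, PySem.Set.isdisjoint_iff] at hdis
        push Not at hdis
        obtain ⟨x, hx, hxj⟩ := hdis
        exact ⟨x, hxj, (elem_bridge u x).2 (Or.inl ((PySem.Set.mem_ofList _ _).1 hx))⟩
      · rw [Bool.not_true, Bool.eq_false_iff, Ne, PySem.Set.issubset_iff] at hsub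
        push Not at hsub
        obtain ⟨x, hx, hxk⟩ := hsub
        exact ⟨x, (PySem.Set.mem_ofList _ _).1 hx, (elem_bridge u x).2 (Or.inr ⟨by simpa using h4, hxk⟩)⟩
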